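-- pv_equiv track=rewrite | github.com/iwangjian/TopDial | data_utils.py | check_kg_exceed
-- ===== SOURCE A (Python) =====
-- def check_kg_exceed(kg_list, max_len):
--     limit_len = max_len - len(kg_list)
--     kg_str = " ".join([" ".join(kg) for kg in kg_list])
--     kg_tokens = kg_str.split(" ")
--     if len(kg_tokens) > limit_len:
--         return True
--     else:
--         return False
-- ===== SOURCE B (Python) =====
-- def check_kg_exceed(kg_list, max_len):
--     total = 1 + (len(kg_list) - 1 if kg_list else 0)
--     for kg in kg_list:
--         if kg:
--             total += len(kg) - 1
--         for s in kg:
--             total += s.count(" ")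
--     return total > max_len - len(kg_list)
-- ===== Notes on version B (the rewrite author's own statement) =====
-- stated objective: alternative
-- what changed: Replaces build-join-string-then-split-then-len with a single-pass arithmetic counter: token count = spaces + 1, so B sums separator and in-string space counts and never materializes the joined string or the token list.
import Mathlib
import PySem

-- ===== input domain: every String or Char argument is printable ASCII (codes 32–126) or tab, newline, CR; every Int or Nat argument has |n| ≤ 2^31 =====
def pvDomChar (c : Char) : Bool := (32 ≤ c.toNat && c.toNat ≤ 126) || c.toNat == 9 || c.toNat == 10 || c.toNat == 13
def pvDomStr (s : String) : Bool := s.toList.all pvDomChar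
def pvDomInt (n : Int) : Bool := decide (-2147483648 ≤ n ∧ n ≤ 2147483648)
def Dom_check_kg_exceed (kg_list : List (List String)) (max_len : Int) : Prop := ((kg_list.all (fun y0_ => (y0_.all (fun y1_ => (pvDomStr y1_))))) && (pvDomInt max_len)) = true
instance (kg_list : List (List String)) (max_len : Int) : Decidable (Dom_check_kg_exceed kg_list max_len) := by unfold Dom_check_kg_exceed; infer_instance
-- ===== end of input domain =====

-- B replaces join/split/len with a single-pass space-counting loop (tokens = spaces + 1); same cost class, no joined string or token list is built.

-- ===== PORT A =====
def check_kg_exceed (kg_list : List (List String)) (max_len : Int) : Bool :=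
  let limit_len : Int := max_len - (kg_list.length : Int)
  let kg_str : String := PySem.Str.join " " (kg_list.map (fun kg => PySem.Str.join " " kg))
  -- sep " " is the nonempty literal, so split? always returns some; getD [] is unreachable
  let kg_tokens : List String := (PySem.Str.split? kg_str " ").getD []
  if (kg_tokens.length : Int) > limit_len then true else false

-- ===== PORT B =====
def check_kg_exceed_alt (kg_list : List (List String)) (max_len : Int) : Bool :=
  let total0 : Int := 1 + (if kg_list ≠ [] then (kg_list.length : Int) - 1 else 0)
  let total : Int := kg_list.foldl
    (fun t kg =>
      let t := if kg ≠ [] then t + ((kg.length : Int) - 1) else t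
      kg.foldl (fun t s => t + (PySem.Str.count s " " : Int)) t)
    total0
  decide (total > max_len - (kg_list.length : Int))

-- ===== PRECONDITION & SPEC =====
def Spec_check_kg_exceed (kg_list : List (List String)) (max_len : Int) (out : Bool) : Prop := out = check_kg_exceed_alt kg_list max_len
instance (kg_list : List (List String)) (max_len : Int) (out : Bool) : Decidable (Spec_check_kg_exceed kg_list max_len out) := by unfold Spec_check_kg_exceed; infer_instance

-- ===== CLAIM (what is proved, stated in full; the proofs are below) =====
def Claim_equal_check_kg_exceed : Prop := ∀ (kg_list : List (List String)) (max_len : Int), Dom_check_kg_exceed kg_list max_len → Spec_check_kg_exceed kg_list max_len (check_kg_exceed kg_list max_len)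

-- ===== LEMMAS AND PROOFS =====

-- the per-element token contribution (as B counts it)
def pvInnerI (kg : List String) : Int :=
  (if kg = [] then 0 else (kg.length : Int) - 1)
    + ((kg.map (fun s => (s.toList.count ' ' : Int))).sum)

lemma countgo_space (l : List Char) (fuel acc : Nat) (h : l.length <= fuel) :
    PySem.Chars.count.go [' '] fuel l acc = acc + l.count ' ' := by
  induction l generalizing fuel acc with
  | nil => cases fuel <;> simp [PySem.Chars.count.go]
  | cons c t ih =>
    cases fuel with
    | zero => simp at h
    | succ f =>
      by_cases hc : c = ' '
      · subst hc
        have hgo : PySem.Chars.count.go [' '] (f+1) (' '::t) acc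
            = PySem.Chars.count.go [' '] f t (acc+1) := by
          simp [PySem.Chars.count.go, List.isPrefixOf]
        rw [hgo, ih f (acc+1) (by simpa using h)]
        simp
        omega
      · have hgo : PySem.Chars.count.go [' '] (f+1) (c::t) acc
            = PySem.Chars.count.go [' '] f t acc := by
          simp [PySem.Chars.count.go, List.isPrefixOf, Ne.symm hc]
        rw [hgo, ih f acc (by simpa using h)]
        simp [hc]

lemma ccount_space (cs : List Char) : PySem.Chars.count cs [' '] = cs.count ' ' := by
  unfold PySem.Chars.count
  simp
  rw [countgo_space cs cs.length 0 le_rfl]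
  simp

lemma count_space (s : String) : PySem.Str.count s " " = s.toList.count ' ' := by
  rw [PySem.Str.count_eq, show (" " : String).toList = [' '] from rfl, ccount_space]

lemma splitgo_space (l : List Char) (fuel : Nat) (cur : List Char) (acc : List (List Char))
    (h : l.length <= fuel) :
    (PySem.Chars.splitOn.go [' '] fuel l cur acc).length = acc.length + l.count ' ' + 1 := by
  induction l generalizing fuel cur acc with
  | nil => cases fuel <;> simp [PySem.Chars.splitOn.go]
  | cons c t ih =>
    cases fuel with
    | zero => simp at h
    | succ f =>
      by_cases hc : c = ' '
      · subst hc
        have hgo : PySem.Chars.splitOn.go [' '] (f+1) (' '::t) cur acc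
            = PySem.Chars.splitOn.go [' '] f t [] (cur.reverse :: acc) := by
          simp [PySem.Chars.splitOn.go, List.isPrefixOf]
        rw [hgo, ih f [] (cur.reverse :: acc) (by simpa using h)]
        simp
        omega
      · have hgo : PySem.Chars.splitOn.go [' '] (f+1) (c::t) cur acc
            = PySem.Chars.splitOn.go [' '] f t (c :: cur) acc := by
          simp [PySem.Chars.splitOn.go, List.isPrefixOf, Ne.symm hc]
        rw [hgo, ih f (c :: cur) acc (by simpa using h)]
        simp [hc]

lemma split_space_len (s : String) :
    (((PySem.Str.split? s " ").getD []).length : Int) = (s.toList.count ' ' : Int) + 1 := by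
  have h := PySem.Str.split?_map s " "
  rw [show (" " : String).toList = [' '] from rfl] at h
  have h2 : PySem.Chars.split? s.toList [' '] = some (PySem.Chars.splitOn s.toList [' ']) := by
    simp [PySem.Chars.split?]
  rw [h2] at h
  cases hs : PySem.Str.split? s " " with
  | none => rw [hs] at h; simp at h
  | some l =>
    rw [hs] at h
    simp only [Option.map_some, Option.some.injEq] at h
    have hlen : l.length = (PySem.Chars.splitOn s.toList [' ']).length := by
      rw [← h, List.length_map]
    rw [PySem.Chars.splitOn,
      splitgo_space s.toList (s.toList.length + 1) [] [] (by omega)] at hlen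
    simp [hlen]

-- count of spaces in a nonempty space-join
lemma count_join_space (p : List Char) (rest : List (List Char)) :
    (PySem.Chars.join [' '] (p :: rest)).count ' '
      = p.count ' ' + ((rest.map (fun q => q.count ' ')).sum + rest.length) := by
  induction rest generalizing p with
  | nil => simp [PySem.Chars.join, List.intercalate]
  | cons q rest ih =>
    rw [PySem.Chars.join_cons_cons]
    simp only [List.count_append, ih q]
    simp
    omega

-- spaces in the inner join, as B's per-element contribution
lemma inner_count (kg : List String) :
    ((PySem.Str.join " " kg).toList.count ' ' : Int) = pvInnerI kg := by
  rw [PySem.Str.toList_join, show (" " : String).toList = [' '] from rfl]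
  cases kg with
  | nil => simp [PySem.Chars.join, List.intercalate, pvInnerI]
  | cons s rest =>
    rw [List.map_cons, count_join_space]
    simp only [pvInnerI, List.map_map, Function.comp_def, List.length_map]
    push_cast
    simp only [List.map_map, Function.comp_def, List.map_cons, List.sum_cons, List.length_cons]
    push_cast
    ring

-- cast of the per-element space-count sum
lemma pvSumInner (ks : List (List String)) :
    ((ks.map (fun q => ((PySem.Str.join " " q).toList.count ' ' : Nat))).map (Nat.cast : Nat → Int)).sum
      = (ks.map pvInnerI).sum := by
  induction ks with
  | nil => simp
  | cons q qs ihq =>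
    simp only [List.map_cons, List.sum_cons, ihq]
    rw [inner_count q]

-- B's inner foldl adds the space counts of the strings
lemma inner_foldl (kg : List String) (t : Int) :
    kg.foldl (fun t s => t + (PySem.Str.count s " " : Int)) t
      = t + (kg.map (fun s => (s.toList.count ' ' : Int))).sum := by
  induction kg generalizing t with
  | nil => simp
  | cons s rest ih =>
    rw [List.foldl_cons, ih, count_space s, List.map_cons, List.sum_cons]
    ring

-- B's outer foldl adds pvInnerI of each element
lemma outer_foldl (l : List (List String)) (t : Int) :
    l.foldl
      (fun t kg =>
        let t := if kg ≠ [] then t + ((kg.length : Int) - 1) else t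
        kg.foldl (fun t s => t + (PySem.Str.count s " " : Int)) t)
      t
      = t + (l.map pvInnerI).sum := by
  induction l generalizing t with
  | nil => simp
  | cons kg rest ih =>
    rw [List.foldl_cons, ih]
    simp only [inner_foldl, List.map_cons, List.sum_cons, pvInnerI]
    by_cases h : kg = []
    · simp [h]
    · simp [h]
      ring

-- A's token count equals B's running total
lemma totals_eq (kg_list : List (List String)) :
    (((PySem.Str.split? (PySem.Str.join " " (kg_list.map (fun kg => PySem.Str.join " " kg))) " ").getD []).length : Int)
      = 1 + (if kg_list ≠ [] then (kg_list.length : Int) - 1 else 0) + (kg_list.map pvInnerI).sum := by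
  rw [split_space_len]
  cases kg_list with
  | nil =>
    simp [PySem.Str.toList_join, PySem.Chars.join, List.intercalate]
  | cons k ks =>
    rw [PySem.Str.toList_join, show (" " : String).toList = [' '] from rfl,
      List.map_cons, List.map_cons, count_join_space]
    simp only [List.map_map, Function.comp_def, List.length_map, List.map_cons, List.sum_cons]
    push_cast
    rw [inner_count k, pvSumInner ks]
    simp
    ring

-- ===== VERDICT (by name: the statement is the Claim_ definition above) =====
theorem check_kg_exceed_spec : Claim_equal_check_kg_exceed := by
  intro kg_list max_len _
  unfold Spec_check_kg_exceed check_kg_exceed check_kg_exceed_alt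
  simp only [outer_foldl, totals_eq]
  by_cases h : (1 + (if kg_list ≠ [] then (kg_list.length : Int) - 1 else 0)
      + (kg_list.map pvInnerI).sum) > max_len - (kg_list.length : Int) <;> simp [h]
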